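-- pv_equiv track=rewrite | github.com/Fish-In-A-Suit/AngioDiabetesRegulation | util.py | convert_linear_list_to_dictionary
-- ===== SOURCE A (Python) =====
-- def convert_linear_list_to_dictionary(linear_list, flip=False):
--     """
--     Converts a linear list of [a1,b1,a2,b2,a3,b3] to dictionary between ax and bx
--
--     If flip == True, then final dictionary is between bx (keys) and ax (values)
--     """
--     i = 0
--     temp_pair = []
--     result_dict = {}
--     for element in linear_list:
--         temp_pair.append(element)
--         if i % 2 == 1 and i != 0:
--             if flip == False:
--                 result_dict[temp_pair[0]] = temp_pair[1]
--             else: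
--                 result_dict[temp_pair[1]] = temp_pair[0]
--             temp_pair = []
--         i+=1
--     return result_dict
-- ===== SOURCE B (Python) =====
-- def convert_linear_list_to_dictionary(linear_list, flip=False):
--     """Pair consecutive elements with the zip(it, it) idiom instead of a
--     counter/accumulator loop; a trailing odd element is dropped by zip."""
--     it = iter(linear_list)
--     pairs = zip(it, it)
--     if flip == False:
--         return dict(pairs)
--     return {b: a for a, b in pairs}
-- ===== Notes on version B (the rewrite author's own statement) =====
-- stated objective: idiomatic
-- what changed: Replaces the index-counter/temp-pair accumulator loop with the standard zip(it, it) consecutive-pairing idiom fed straight into dict() (or a flipped dict comprehension).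
import Mathlib
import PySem

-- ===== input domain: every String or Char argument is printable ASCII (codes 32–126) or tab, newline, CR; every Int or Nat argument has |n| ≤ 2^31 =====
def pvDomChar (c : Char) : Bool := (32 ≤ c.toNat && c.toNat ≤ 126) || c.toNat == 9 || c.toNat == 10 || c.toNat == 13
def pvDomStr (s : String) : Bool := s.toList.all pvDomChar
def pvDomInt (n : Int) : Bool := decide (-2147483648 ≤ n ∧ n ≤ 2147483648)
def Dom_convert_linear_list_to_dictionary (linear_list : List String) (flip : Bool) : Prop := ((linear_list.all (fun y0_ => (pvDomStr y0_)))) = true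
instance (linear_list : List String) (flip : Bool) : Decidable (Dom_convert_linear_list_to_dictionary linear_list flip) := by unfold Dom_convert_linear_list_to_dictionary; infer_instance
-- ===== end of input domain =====

-- B replaces A's counter/temp-pair accumulator loop with the idiomatic zip(it, it)
-- consecutive-pairing fed straight into dict(); equal return value, no speed claim.

-- ===== PORT A =====
-- state = (i, temp_pair, result_dict); temp_pair[0]/temp_pair[1] are read only when
-- temp_pair has exactly two elements, so pyGetD with a dummy default is exact there.
def convert_linear_list_to_dictionary (linear_list : List String) (flip : Bool) : List (String × String) :=
  (linear_list.foldl
    (fun (st : Int × List String × PySem.Dict String String) element =>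
      let i := st.1
      let temp_pair := st.2.1 ++ [element]
      let result_dict := st.2.2
      if PySem.Int.mod i 2 == 1 && i != 0 then
        if flip == false then
          (i + 1, ([] : List String),
            result_dict.insert (PySem.List.pyGetD temp_pair 0 "") (PySem.List.pyGetD temp_pair 1 ""))
        else
          (i + 1, ([] : List String),
            result_dict.insert (PySem.List.pyGetD temp_pair 1 "") (PySem.List.pyGetD temp_pair 0 ""))
      else
        (i + 1, temp_pair, result_dict))
    (0, [], PySem.Dict.empty)).2.2.items

-- ===== PORT B =====
-- zip(it, it): consecutive disjoint pairs, trailing odd element dropped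
def pvPairs : List String → List (String × String)
  | a :: b :: t => (a, b) :: pvPairs t
  | _ => []

def convert_linear_list_to_dictionary_alt (linear_list : List String) (flip : Bool) : List (String × String) :=
  let pairs := pvPairs linear_list
  if flip == false then
    (PySem.Dict.ofList pairs).items
  else
    (PySem.Dict.ofList (pairs.map (fun p => (p.2, p.1)))).items

-- ===== PRECONDITION & SPEC =====
def Spec_convert_linear_list_to_dictionary (linear_list : List String) (flip : Bool) (out : List (String × String)) : Prop := out = convert_linear_list_to_dictionary_alt linear_list flip
instance (linear_list : List String) (flip : Bool) (out : List (String × String)) : Decidable (Spec_convert_linear_list_to_dictionary linear_list flip out) := by unfold Spec_convert_linear_list_to_dictionary; infer_instance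

-- ===== CLAIM (what is proved, stated in full; the proofs are below) =====
def Claim_equal_convert_linear_list_to_dictionary : Prop := ∀ (linear_list : List String) (flip : Bool), Dom_convert_linear_list_to_dictionary linear_list flip → Spec_convert_linear_list_to_dictionary linear_list flip (convert_linear_list_to_dictionary linear_list flip)

-- ===== LEMMAS AND PROOFS =====
-- the loop body of port A, named for the proofs
def pvStepA (flip : Bool) (st : Int × List String × PySem.Dict String String) (element : String) :
    Int × List String × PySem.Dict String String :=
  let i := st.1
  let temp_pair := st.2.1 ++ [element]
  let result_dict := st.2.2
  if PySem.Int.mod i 2 == 1 && i != 0 then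
    if flip == false then
      (i + 1, ([] : List String),
        result_dict.insert (PySem.List.pyGetD temp_pair 0 "") (PySem.List.pyGetD temp_pair 1 ""))
    else
      (i + 1, ([] : List String),
        result_dict.insert (PySem.List.pyGetD temp_pair 1 "") (PySem.List.pyGetD temp_pair 0 ""))
  else
    (i + 1, temp_pair, result_dict)

theorem pvUpdate_cons {κ ν : Type} [BEq κ] (d : PySem.Dict κ ν) (p : κ × ν) (ps : List (κ × ν)) :
    d.update (p :: ps) = (d.insert p.1 p.2).update ps := rfl

theorem pvStepA_two (flip : Bool) (i : Int) (hi : 0 ≤ i) (he : i % 2 = 0)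
    (d : PySem.Dict String String) (a b : String) :
    pvStepA flip (pvStepA flip (i, [], d) a) b
      = (i + 1 + 1, [], if flip = false then d.insert a b else d.insert b a) := by
  have hA : ¬(i % 2 = 1 ∧ ¬i = 0) := by omega
  have hB : (i + 1) % 2 = 1 ∧ ¬(i + 1) = 0 := ⟨by omega, by omega⟩
  cases flip <;> simp [pvStepA, PySem.Int.mod, Int.fmod_eq_emod, hA, hB, PySem.List.pyGetD_ofNat']

theorem pvLoop_eq (flip : Bool) (t : List String) :
    ∀ (d : PySem.Dict String String) (i : Int), 0 ≤ i → i % 2 = 0 →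
      (t.foldl (pvStepA flip) (i, [], d)).2.2
      = d.update (if flip = false then pvPairs t else (pvPairs t).map (fun p => (p.2, p.1))) := by
  induction t using pvPairs.induct with
  | case1 a b t ih =>
    intro d i hi he
    rw [List.foldl_cons, List.foldl_cons, pvStepA_two flip i hi he d a b,
      ih _ (i + 1 + 1) (by omega) (by omega)]
    cases flip <;> simp [pvPairs, pvUpdate_cons]
  | case2 t h =>
    intro d i hi he
    cases t with
    | nil => simp [pvPairs, PySem.Dict.update]
    | cons a t' =>
      cases t' with
      | nil =>
        have hA : ¬(i % 2 = 1 ∧ ¬i = 0) := by omega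
        simp [pvPairs, PySem.Dict.update, List.foldl, pvStepA, PySem.Int.mod,
          Int.fmod_eq_emod, hA]
      | cons b t'' => exact absurd rfl (h a b t'')

-- ===== VERDICT (by name: the statement is the Claim_ definition above) =====
theorem convert_linear_list_to_dictionary_spec : Claim_equal_convert_linear_list_to_dictionary := by
  intro linear_list flip _
  unfold Spec_convert_linear_list_to_dictionary convert_linear_list_to_dictionary convert_linear_list_to_dictionary_alt
  show (linear_list.foldl (pvStepA flip) (0, [], PySem.Dict.empty)).2.2.items = _
  rw [pvLoop_eq flip linear_list PySem.Dict.empty 0 le_rfl rfl]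
  cases flip <;> simp [PySem.Dict.ofList]
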